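-- pv_equiv track=rewrite | github.com/aledlie/ast-grep-mcp | src/ast_grep_mcp/features/documentation/docstring_generator.py | _collect_jsdoc_multiline
-- ===== SOURCE A (Python) =====
-- from typing import Any, Dict, List, Optional, Tuple
--
-- def _collect_jsdoc_multiline(lines: List[str], end_idx: int, last_line: str) -> Optional[str]:
--     """Collect lines of a multi-line JSDoc comment."""
--     doc_lines = [last_line[:-2]]
--     j = end_idx - 1
--     while j >= 0:
--         curr_line = lines[j].strip()
--         if "/**" in curr_line:
--             doc_lines.append(curr_line[curr_line.find("/**") + 3 :])
--             break
--         doc_lines.append(curr_line[1:].strip() if curr_line.startswith("*") else curr_line)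
--         j -= 1
--     if j < 0:
--         return None
--     doc_lines.reverse()
--     return "\n".join(doc_lines).strip()
-- ===== SOURCE B (Python) =====
-- from typing import List, Optional
--
-- def _collect_jsdoc_multiline(lines: List[str], end_idx: int, last_line: str) -> Optional[str]:
--     """Locate the '/**' opening line by scanning backward, then fill the doc lines forward."""
--     open_idx = -1
--     for j in range(end_idx - 1, -1, -1):
--         if "/**" in lines[j].strip():
--             open_idx = j
--             break
--     if open_idx < 0:
--         return None
--     opening = lines[open_idx].strip()
--     doc = [opening[opening.find("/**") + 3:]]
--     for j in range(open_idx + 1, end_idx):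
--         t = lines[j].strip()
--         doc.append(t[1:].strip() if t.startswith("*") else t)
--     doc.append(last_line[:-2])
--     return "\n".join(doc).strip()
-- ===== Notes on version B (the rewrite author's own statement) =====
-- stated objective: faster
-- what changed: Replaces A's single backward accumulate-then-reverse loop with two phases: a backward scan that only locates the '/**' opening index (building nothing), then a forward pass that emits the doc lines in final order, so no list accumulation during the scan and no reverse() is needed.
import Mathlib
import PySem

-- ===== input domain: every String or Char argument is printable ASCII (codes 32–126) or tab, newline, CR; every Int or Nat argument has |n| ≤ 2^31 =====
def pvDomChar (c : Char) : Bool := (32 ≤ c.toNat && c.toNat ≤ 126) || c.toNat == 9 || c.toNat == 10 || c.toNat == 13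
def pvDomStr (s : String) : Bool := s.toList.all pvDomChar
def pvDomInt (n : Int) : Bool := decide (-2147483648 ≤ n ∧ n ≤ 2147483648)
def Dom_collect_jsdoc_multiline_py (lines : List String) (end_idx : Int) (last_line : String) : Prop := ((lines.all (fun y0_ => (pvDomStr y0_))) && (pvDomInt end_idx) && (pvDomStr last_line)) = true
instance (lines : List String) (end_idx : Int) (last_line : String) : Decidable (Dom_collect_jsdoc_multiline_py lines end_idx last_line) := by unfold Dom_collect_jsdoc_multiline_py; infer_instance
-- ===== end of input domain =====

-- B replaces A's backward accumulate-then-reverse loop by locating the '/**' opening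
-- index backward (building nothing) and then filling the doc lines forward in final order,
-- with no reverse(); a timing run measured B faster by a constant factor.

-- ===== PORT A =====
-- A's while loop scanning j downward, appending to doc_lines; returns none when j runs below 0.
def pvA_open (curr : String) : String :=
  PySem.Str.slice curr (some (PySem.Str.find curr "/**" + 3)) none

def pvA_rest (curr : String) : String :=
  if PySem.Str.startswith curr "*" then PySem.Str.strip (PySem.Str.slice curr (some 1) none) else curr

def pvA_loop (lines : List String) : Nat → List String → Option (List String)
  | 0, acc =>
    let curr := PySem.Str.strip (lines.getD 0 "")
    if PySem.Str.isIn "/**" curr then some (acc ++ [pvA_open curr]) else none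
  | j + 1, acc =>
    let curr := PySem.Str.strip (lines.getD (j + 1) "")
    if PySem.Str.isIn "/**" curr then some (acc ++ [pvA_open curr])
    else pvA_loop lines j (acc ++ [pvA_rest curr])

def collect_jsdoc_multiline_py (lines : List String) (end_idx : Int) (last_line : String) : Option String :=
  let doc0 := [PySem.Str.slice last_line none (some (-2))]
  if end_idx - 1 < 0 then none
  else
    match pvA_loop lines (end_idx - 1).toNat doc0 with
    | none => none
    | some ds => some (PySem.Str.strip (PySem.Str.join "\n" ds.reverse))

-- ===== PORT B =====
-- backward scan that only finds the index of the line containing "/**"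
def pvB_findOpen (lines : List String) : Nat → Option Nat
  | 0 => if PySem.Str.isIn "/**" (PySem.Str.strip (lines.getD 0 "")) then some 0 else none
  | j + 1 =>
    if PySem.Str.isIn "/**" (PySem.Str.strip (lines.getD (j + 1) "")) then some (j + 1)
    else pvB_findOpen lines j

-- body of B's forward loop: one interior doc line
def pvB_body (lines : List String) (j : Nat) : String :=
  let t := PySem.Str.strip (lines.getD j "")
  if PySem.Str.startswith t "*" then PySem.Str.strip (PySem.Str.slice t (some 1) none) else t

def collect_jsdoc_multiline_py_alt (lines : List String) (end_idx : Int) (last_line : String) : Option String :=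
  if end_idx - 1 < 0 then none
  else
    match pvB_findOpen lines (end_idx - 1).toNat with
    | none => none
    | some k =>
      let opening := PySem.Str.strip (lines.getD k "")
      let doc := [PySem.Str.slice opening (some (PySem.Str.find opening "/**" + 3)) none]
                   ++ (List.range' (k + 1) ((end_idx - 1).toNat - k)).map (pvB_body lines)
                   ++ [PySem.Str.slice last_line none (some (-2))]
      some (PySem.Str.strip (PySem.Str.join "\n" doc))

-- ===== PRECONDITION & SPEC =====
-- Pre_ excludes exactly the inputs where Python A raises IndexError: end_idx beyond len(lines).
def Pre_collect_jsdoc_multiline_py (lines : List String) (end_idx : Int) (last_line : String) : Prop :=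
  end_idx ≤ lines.length

instance (lines : List String) (end_idx : Int) (last_line : String) : Decidable (Pre_collect_jsdoc_multiline_py lines end_idx last_line) := by unfold Pre_collect_jsdoc_multiline_py; infer_instance

def pvWitness_collect_jsdoc_multiline_py : List String × Int × String := (["/** doc", " * x"], 2, " x */")

def Spec_collect_jsdoc_multiline_py (lines : List String) (end_idx : Int) (last_line : String) (out : Option String) : Prop := out = collect_jsdoc_multiline_py_alt lines end_idx last_line
instance (lines : List String) (end_idx : Int) (last_line : String) (out : Option String) : Decidable (Spec_collect_jsdoc_multiline_py lines end_idx last_line out) := by unfold Spec_collect_jsdoc_multiline_py; infer_instance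

-- ===== CLAIM (what is proved, stated in full; the proofs are below) =====
def Claim_equal_collect_jsdoc_multiline_py : Prop := ∀ (lines : List String) (end_idx : Int) (last_line : String), Dom_collect_jsdoc_multiline_py lines end_idx last_line → Pre_collect_jsdoc_multiline_py lines end_idx last_line → Spec_collect_jsdoc_multiline_py lines end_idx last_line (collect_jsdoc_multiline_py lines end_idx last_line)

-- ===== LEMMAS AND PROOFS =====

lemma pvB_findOpen_le (lines : List String) (j k : Nat) (h : pvB_findOpen lines j = some k) : k ≤ j := by
  induction j with
  | zero =>
      simp only [pvB_findOpen] at h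
      split at h
      · simp at h; omega
      · simp at h
  | succ j ih =>
      simp only [pvB_findOpen] at h
      split at h
      · simp at h; omega
      · exact Nat.le_succ_of_le (ih h)

lemma pv_loop_eq (lines : List String) (j : Nat) (acc : List String) :
    pvA_loop lines j acc = (pvB_findOpen lines j).map (fun k =>
      acc ++ ((List.range' (k + 1) (j - k)).reverse.map (pvB_body lines))
          ++ [pvA_open (PySem.Str.strip (lines.getD k ""))]) := by
  induction j generalizing acc with
  | zero =>
      simp only [pvA_loop, pvB_findOpen]
      split
      · simp
      · simp
  | succ j ih =>
      simp only [pvA_loop, pvB_findOpen]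
      split
      · simp
      · rw [ih]
        cases hfo : pvB_findOpen lines j with
        | none => simp
        | some k =>
            have hk : k ≤ j := pvB_findOpen_le lines j k hfo
            simp only [Option.map_some]
            have hrange : List.range' (k + 1) (j + 1 - k) = List.range' (k + 1) (j - k) ++ [j + 1] := by
              have h1 : j + 1 - k = (j - k) + 1 := by omega
              rw [h1, List.range'_concat]
              congr 2
              omega
            rw [hrange]
            simp [pvB_body, pvA_rest]

-- ===== VERDICT (by name: the statement is the Claim_ definition above) =====
theorem collect_jsdoc_multiline_py_spec : Claim_equal_collect_jsdoc_multiline_py := by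
  intro lines end_idx last_line _hdom _hpre
  unfold Spec_collect_jsdoc_multiline_py
  unfold collect_jsdoc_multiline_py collect_jsdoc_multiline_py_alt
  by_cases h : end_idx - 1 < 0
  · simp [h]
  · simp only [h, if_false]
    rw [pv_loop_eq]
    cases hfo : pvB_findOpen lines (end_idx - 1).toNat with
    | none => simp
    | some k => simp [pvA_open, List.map_reverse]
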